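-- pv_equiv track=rewrite | github.com/Wolleaf/CS61A-Summer2022 | projects/cats/cats.py | feline_fixes
-- ===== SOURCE A (Python) =====
-- def feline_fixes(typed, reference, limit):
--     """A diff function for autocorrect that determines how many letters
--     in TYPED need to be substituted to create REFERENCE, then adds the difference in
--     their lengths and returns the result.
--
--     Arguments:
--         typed: a starting word
--         reference: a string representing a desired goal word
--         limit: a number representing an upper bound on the number of chars that must change
--
--     >>> big_limit = 10
--     >>> feline_fixes("nice", "rice", big_limit)    # Substitute: n -> r
--     1
--     >>> feline_fixes("range", "rungs", big_limit)  # Substitute: a -> u, e -> s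
--     2
--     >>> feline_fixes("pill", "pillage", big_limit) # Don't substitute anything, length difference of 3.
--     3
--     >>> feline_fixes("roses", "arose", big_limit)  # Substitute: r -> a, o -> r, s -> o, e -> s, s -> e
--     5
--     >>> feline_fixes("rose", "hello", big_limit)   # Substitute: r->h, o->e, s->l, e->l, length difference of 1.
--     5
--     """
--     # BEGIN PROBLEM 6
--     if limit < 0:
--         return 1
--     if len(typed) == 0 or len(reference) == 0:
--         return max(len(typed), len(reference))
--     if typed[0] == reference[0]:
--         return feline_fixes(typed[1:], reference[1:], limit)
--     else:
--         return feline_fixes(typed[1:], reference[1:], limit - 1) + 1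
-- ===== SOURCE B (Python) =====
-- def feline_fixes(typed, reference, limit):
--     i = 0
--     count = 0
--     while True:
--         if limit < 0:
--             return count + 1
--         if i >= len(typed) or i >= len(reference):
--             return count + max(len(typed) - i, len(reference) - i)
--         if typed[i] != reference[i]:
--             limit -= 1
--             count += 1
--         i += 1
-- ===== Notes on version B (the rewrite author's own statement) =====
-- stated objective: faster
-- what changed: Replaced the slice-copying recursion by an iterative index loop with a mismatch counter, removing per-step O(n) string-slice copies (O(n^2) -> O(n)).
import Mathlib
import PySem

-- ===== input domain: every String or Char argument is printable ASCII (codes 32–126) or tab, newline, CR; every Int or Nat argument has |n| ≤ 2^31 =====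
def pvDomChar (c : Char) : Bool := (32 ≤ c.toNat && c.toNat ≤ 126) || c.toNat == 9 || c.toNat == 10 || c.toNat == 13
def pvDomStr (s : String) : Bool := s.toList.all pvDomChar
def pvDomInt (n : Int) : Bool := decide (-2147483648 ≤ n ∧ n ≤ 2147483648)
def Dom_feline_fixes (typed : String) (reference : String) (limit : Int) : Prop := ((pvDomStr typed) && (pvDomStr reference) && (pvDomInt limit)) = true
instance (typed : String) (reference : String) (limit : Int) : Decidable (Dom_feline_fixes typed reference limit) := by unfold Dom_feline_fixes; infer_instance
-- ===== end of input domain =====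

-- B replaces A's slice-copying recursion by an iterative index loop with a mismatch counter (simpler, no slice copies).
-- ===== PORT A =====
-- literal port of A's recursion; strings are handled as their character lists, typed[1:] = tail
def felineFixesRec (typed : List Char) (reference : List Char) (limit : Int) : Int :=
  if limit < 0 then 1
  else if typed.length = 0 ∨ reference.length = 0 then
    max (typed.length : Int) (reference.length : Int)
  else
    match typed, reference with
    | t0 :: trest, r0 :: rrest =>
      if t0 = r0 then felineFixesRec trest rrest limit
      else felineFixesRec trest rrest (limit - 1) + 1
    | _, _ => 0  -- unreachable: both lists nonempty here
termination_by typed.length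

def feline_fixes (typed : String) (reference : String) (limit : Int) : Int :=
  felineFixesRec typed.toList reference.toList limit

-- ===== PORT B =====
-- literal port of B's while-loop: advancing index i over the two strings is consuming both
-- character lists in lock-step; loop state (limit, count) carried as accumulators
def felineFixesLoop (t : List Char) (r : List Char) (limit : Int) (count : Int) : Int :=
  if limit < 0 then count + 1
  else
    match t, r with
    | [], r => count + max (0 : Int) (r.length : Int)
    | t, [] => count + max (t.length : Int) (0 : Int)
    | t0 :: trest, r0 :: rrest =>
      if t0 ≠ r0 then felineFixesLoop trest rrest (limit - 1) (count + 1)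
      else felineFixesLoop trest rrest limit count

def feline_fixes_alt (typed : String) (reference : String) (limit : Int) : Int :=
  felineFixesLoop typed.toList reference.toList limit 0

-- ===== PRECONDITION & SPEC =====
def Spec_feline_fixes (typed : String) (reference : String) (limit : Int) (out : Int) : Prop := out = feline_fixes_alt typed reference limit
instance (typed : String) (reference : String) (limit : Int) (out : Int) : Decidable (Spec_feline_fixes typed reference limit out) := by unfold Spec_feline_fixes; infer_instance

-- ===== CLAIM (what is proved, stated in full; the proofs are below) =====
def Claim_equal_feline_fixes : Prop := ∀ (typed : String) (reference : String) (limit : Int), Dom_feline_fixes typed reference limit → Spec_feline_fixes typed reference limit (feline_fixes typed reference limit)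

-- ===== LEMMAS AND PROOFS =====

-- ===== VERDICT (by name: the statement is the Claim_ definition above) =====
lemma felineFixesLoop_eq (t r : List Char) :
    ∀ (limit count : Int), felineFixesLoop t r limit count = count + felineFixesRec t r limit := by
  induction t generalizing r with
  | nil =>
    intro limit count
    cases r <;> simp [felineFixesLoop, felineFixesRec] <;> split_ifs <;> omega
  | cons t0 trest ih =>
    intro limit count
    cases r with
    | nil => simp [felineFixesLoop, felineFixesRec]; split_ifs <;> omega
    | cons r0 rrest =>
      by_cases hl : limit < 0
      · simp [felineFixesLoop, felineFixesRec, hl]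
      · by_cases he : t0 = r0
        · simp [felineFixesLoop, felineFixesRec, hl, he, ih]
        · simp [felineFixesLoop, felineFixesRec, hl, he, ih]
          omega

theorem feline_fixes_spec : Claim_equal_feline_fixes := by
  intro typed reference limit _
  unfold Spec_feline_fixes feline_fixes feline_fixes_alt
  rw [felineFixesLoop_eq]
  omega
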